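-- pv_equiv track=rewrite | github.com/darshu-web/NLP-Query-Engine | backend/api/ingestion.py | _infer_types
-- ===== SOURCE A (Python) =====
-- from typing import List
--
-- def _infer_types(sample_rows: List[List[str]]) -> List[str]:
--     types: List[str] = []
--     cols = len(sample_rows[0]) if sample_rows else 0
--     for c in range(cols):
--         col_values = [r[c] for r in sample_rows if c < len(r)]
--         def is_int(v: str) -> bool:
--             try:
--                 int(v)
--                 return True
--             except Exception:
--                 return False
--         def is_float(v: str) -> bool:
--             try:
--                 float(v)
--                 # Exclude ints already handled
--                 return not is_int(v)
--             except Exception: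
--                 return False
--         if col_values and all(is_int(v) for v in col_values if v != ""):
--             types.append("INTEGER")
--         elif col_values and all(is_float(v) for v in col_values if v != ""):
--             types.append("REAL")
--         else:
--             types.append("TEXT")
--     return types
-- ===== SOURCE B (Python) =====
-- from typing import List
--
-- def _classify(v: str) -> int:
--     # 0 = integer literal, 1 = float-but-not-int literal, 2 = anything else
--     try:
--         int(v)
--         return 0
--     except Exception:
--         pass
--     try:
--         float(v)
--         return 1
--     except Exception:
--         return 2
--
-- def _infer_types(sample_rows: List[List[str]]) -> List[str]:
--     if not sample_rows:
--         return []
--     cols = len(sample_rows[0])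
--     all_int = [True] * cols
--     all_real = [True] * cols
--     for r in sample_rows:
--         for c in range(min(len(r), cols)):
--             v = r[c]
--             if v == "":
--                 continue
--             k = _classify(v)
--             if k == 0:
--                 all_real[c] = False
--             elif k == 1:
--                 all_int[c] = False
--             else:
--                 all_int[c] = False
--                 all_real[c] = False
--     return ["INTEGER" if all_int[c] else "REAL" if all_real[c] else "TEXT"
--             for c in range(cols)]
-- ===== Notes on version B (the rewrite author's own statement) =====
-- stated objective: alternative
-- what changed: B replaces A's column-major rebuild-and-scan (materialise each column's value list, then an all-int scan and possibly a separate all-float scan) with a single row-major pass that classifies each cell once and maintains per-column all_int/all_real boolean accumulators.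
import Mathlib
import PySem

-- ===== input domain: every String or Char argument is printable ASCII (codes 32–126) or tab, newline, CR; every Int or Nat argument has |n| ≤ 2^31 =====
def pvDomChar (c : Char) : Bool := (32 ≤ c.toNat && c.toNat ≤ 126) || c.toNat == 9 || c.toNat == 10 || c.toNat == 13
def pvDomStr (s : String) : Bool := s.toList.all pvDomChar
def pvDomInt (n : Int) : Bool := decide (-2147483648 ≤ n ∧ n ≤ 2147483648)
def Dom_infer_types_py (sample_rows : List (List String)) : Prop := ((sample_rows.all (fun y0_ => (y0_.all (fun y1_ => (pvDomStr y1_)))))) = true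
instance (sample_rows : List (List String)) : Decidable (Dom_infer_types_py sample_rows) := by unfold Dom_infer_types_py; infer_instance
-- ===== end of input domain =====

-- B re-implements the column-type inference as ONE row-major pass keeping per-column
-- boolean accumulators, instead of rebuilding each column's value list and scanning it
-- (and re-parsing ints inside the float test) per column.

-- ===== PORT A =====
-- Shared models of the Python built-ins: pyIsInt v = "int(v) succeeds",
-- pyIsFloat v = "float(v) succeeds" (exact on the printable-ASCII + tab/newline/CR domain).
def pyIsInt (v : String) : Bool := (PySem.Int.ofStr? v).isSome

def pyFspace (c : Char) : Bool :=
  c == ' ' || c == '\t' || c == '\n' || c == '\r' || c.toNat == 11 || c.toNat == 12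

def stripWs (l : List Char) : List Char :=
  ((l.dropWhile pyFspace).reverse.dropWhile pyFspace).reverse

def dropSign : List Char → List Char
  | [] => []
  | c :: t => if c == '+' || c == '-' then t else c :: t

-- every '_' must sit between two ASCII digits (CPython float literal rule)
def undOkAux : Char → List Char → Bool
  | _, [] => true
  | p, c :: rest =>
    if c == '_' then
      (p.isDigit && (match rest with | d :: _ => d.isDigit | [] => false)) && undOkAux c rest
    else undOkAux c rest

def expOk : List Char → Bool
  | [] => true
  | c :: t =>
    if c == 'e' || c == 'E' then
      let t' := dropSign t
      !t'.isEmpty && t'.all Char.isDigit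
    else false

def pyIsFloat (v : String) : Bool :=
  let l0 := stripWs v.toList
  if !undOkAux 'x' l0 then false
  else
    let l1 := (l0.filter (fun c => !(c == '_')))
    let l2 := dropSign l1
    let low := l2.map Char.toLower
    if low == ['i','n','f'] || low == ['i','n','f','i','n','i','t','y'] || low == ['n','a','n'] then
      true
    else
      let d1 := l2.takeWhile Char.isDigit
      let rest := l2.drop d1.length
      match rest with
      | '.' :: r2 =>
        let d2 := r2.takeWhile Char.isDigit
        let rest2 := r2.drop d2.length
        if d1.isEmpty && d2.isEmpty then false else expOk rest2
      | _ => if d1.isEmpty then false else expOk rest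

def infer_types_py (sample_rows : List (List String)) : List String :=
  let cols : Int :=
    match sample_rows with
    | [] => 0
    | r0 :: _ => (r0.length : Int)
  (PySem.List.pyRange 0 cols 1).foldl
    (fun types c =>
      let col_values : List String :=
        sample_rows.filterMap
          (fun r => if c < (r.length : Int) then PySem.List.pyGet? r c else none)
      if !col_values.isEmpty
          && (col_values.filter (fun v => !(v == ""))).all (fun v => pyIsInt v) then
        types ++ ["INTEGER"]
      else if !col_values.isEmpty
          && (col_values.filter (fun v => !(v == ""))).all (fun v => pyIsFloat v && !pyIsInt v) then
        types ++ ["REAL"]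
      else
        types ++ ["TEXT"])
    []

-- ===== PORT B =====
def classifyCell (v : String) : Nat :=
  if pyIsInt v then 0 else if pyIsFloat v then 1 else 2

def innerStep (r : List String) (st : List Bool × List Bool) (c : Nat) :
    List Bool × List Bool :=
  let v := r.getD c ""
  if v == "" then st
  else
    let k := classifyCell v
    if k == 0 then (st.1, st.2.set c false)
    else if k == 1 then (st.1.set c false, st.2)
    else (st.1.set c false, st.2.set c false)

def infer_types_py_alt (sample_rows : List (List String)) : List String :=
  match sample_rows with
  | [] => []
  | r0 :: _ =>
    let cols := r0.length
    let st := sample_rows.foldl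
      (fun st r => (List.range (min r.length cols)).foldl (innerStep r) st)
      (List.replicate cols true, List.replicate cols true)
    (List.range cols).map (fun c =>
      if st.1.getD c true then "INTEGER"
      else if st.2.getD c true then "REAL"
      else "TEXT")

-- ===== PRECONDITION & SPEC =====
def Spec_infer_types_py (sample_rows : List (List String)) (out : List String) : Prop := out = infer_types_py_alt sample_rows
instance (sample_rows : List (List String)) (out : List String) : Decidable (Spec_infer_types_py sample_rows out) := by unfold Spec_infer_types_py; infer_instance

-- ===== CLAIM (what is proved, stated in full; the proofs are below) =====
def Claim_equal_infer_types_py : Prop := ∀ (sample_rows : List (List String)), Dom_infer_types_py sample_rows → Spec_infer_types_py sample_rows (infer_types_py sample_rows)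

-- ===== LEMMAS AND PROOFS =====

-- per-cell conditions the accumulators track
def cI (r : List String) (c : Nat) : Bool :=
  (r.getD c "" == "") || pyIsInt (r.getD c "")

def cR (r : List String) (c : Nat) : Bool :=
  (r.getD c "" == "") || (pyIsFloat (r.getD c "") && !pyIsInt (r.getD c ""))

theorem innerStep_len (r : List String) (st : List Bool × List Bool) (j : Nat) :
    (innerStep r st j).1.length = st.1.length ∧ (innerStep r st j).2.length = st.2.length := by
  unfold innerStep
  dsimp only
  split <;> [skip; split] <;> [simp; simp; skip]
  split <;> simp

theorem innerStep_eq (r : List String) (st : List Bool × List Bool) (j : Nat) :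
    innerStep r st j = (if cI r j then st.1 else st.1.set j false,
                        if cR r j then st.2 else st.2.set j false) := by
  unfold innerStep classifyCell cI cR
  generalize r.getD j "" = v
  by_cases hv : v = ""
  · simp [hv]
  · by_cases hint : pyIsInt v
    · simp [hv, hint]
    · by_cases hfl : pyIsFloat v
      · simp [hv, hint, hfl]
      · simp [hv, hint, hfl]

theorem set_false_getD (l : List Bool) (j c : Nat) (h : j < l.length) :
    (l.set j false).getD c true = if c = j then false else l.getD c true := by
  by_cases hcj : c = j
  · subst hcj; simp [List.getD, List.getElem?_set, h]
  · simp [List.getD, List.getElem?_set, hcj, Ne.symm hcj]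

theorem innerStep_fst_getD (r : List String) (st : List Bool × List Bool) (j c : Nat)
    (hj : j < st.1.length) :
    ((innerStep r st j).1).getD c true
      = if c = j then st.1.getD c true && cI r j else st.1.getD c true := by
  rw [innerStep_eq]
  by_cases hci : cI r j
  · simp [hci]
  · simp only [hci, if_false, Bool.false_eq_true, reduceIte]
    rw [set_false_getD st.1 j c hj]
    by_cases hcj : c = j <;> simp [hcj, hci]

theorem innerStep_snd_getD (r : List String) (st : List Bool × List Bool) (j c : Nat)
    (hj : j < st.2.length) :
    ((innerStep r st j).2).getD c true
      = if c = j then st.2.getD c true && cR r j else st.2.getD c true := by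
  rw [innerStep_eq]
  by_cases hcr : cR r j
  · simp [hcr]
  · simp only [hcr, if_false, Bool.false_eq_true, reduceIte]
    rw [set_false_getD st.2 j c hj]
    by_cases hcj : c = j <;> simp [hcj, hcr]

theorem innerFold_len (r : List String) (m : Nat) (st : List Bool × List Bool) :
    ((List.range m).foldl (innerStep r) st).1.length = st.1.length ∧
    ((List.range m).foldl (innerStep r) st).2.length = st.2.length := by
  induction m generalizing st with
  | zero => simp
  | succ m ih =>
    rw [List.range_succ, List.foldl_append]
    simp only [List.foldl_cons, List.foldl_nil]
    have h1 := innerStep_len r ((List.range m).foldl (innerStep r) st) m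
    have h2 := ih st
    omega

theorem innerFold_fst (r : List String) (m : Nat) (st : List Bool × List Bool)
    (hm : m ≤ st.1.length) (c : Nat) :
    (((List.range m).foldl (innerStep r) st).1).getD c true
      = (if c < m then st.1.getD c true && cI r c else st.1.getD c true) := by
  induction m generalizing st with
  | zero => simp
  | succ m ih =>
    rw [List.range_succ, List.foldl_append]
    simp only [List.foldl_cons, List.foldl_nil]
    have hlen := (innerFold_len r m st).1
    rw [innerStep_fst_getD r _ m c (by omega)]
    rw [ih st (by omega)]
    by_cases hcm : c = m
    · subst hcm; simp [Nat.lt_irrefl]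
    · by_cases hlt : c < m
      · simp [hcm, hlt, Nat.lt_succ_of_lt hlt]
      · have : ¬ c < m + 1 := by omega
        simp [hcm, hlt, this]

theorem innerFold_snd (r : List String) (m : Nat) (st : List Bool × List Bool)
    (hm : m ≤ st.2.length) (c : Nat) :
    (((List.range m).foldl (innerStep r) st).2).getD c true
      = (if c < m then st.2.getD c true && cR r c else st.2.getD c true) := by
  induction m generalizing st with
  | zero => simp
  | succ m ih =>
    rw [List.range_succ, List.foldl_append]
    simp only [List.foldl_cons, List.foldl_nil]
    have hlen := (innerFold_len r m st).2
    rw [innerStep_snd_getD r _ m c (by omega)]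
    rw [ih st (by omega)]
    by_cases hcm : c = m
    · subst hcm; simp [Nat.lt_irrefl]
    · by_cases hlt : c < m
      · simp [hcm, hlt, Nat.lt_succ_of_lt hlt]
      · have : ¬ c < m + 1 := by omega
        simp [hcm, hlt, this]

theorem outerFold_fst (rows : List (List String)) (cols : Nat)
    (st : List Bool × List Bool) (h1 : st.1.length = cols) (h2 : st.2.length = cols)
    (c : Nat) (hc : c < cols) :
    ((rows.foldl (fun st r => (List.range (min r.length cols)).foldl (innerStep r) st) st).1).getD c true
      = (st.1.getD c true && rows.all (fun r => !decide (c < r.length) || cI r c)) := by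
  induction rows generalizing st with
  | nil => simp
  | cons r rest ih =>
    simp only [List.foldl_cons, List.all_cons]
    set st' := (List.range (min r.length cols)).foldl (innerStep r) st with hst'
    have hlen := innerFold_len r (min r.length cols) st
    rw [ih st' (by rw [hst']; omega) (by rw [hst']; omega)]
    rw [hst', innerFold_fst r _ st (by omega) c]
    by_cases hr : c < r.length
    · have : c < min r.length cols := by omega
      simp [hr, this, Bool.and_assoc]
    · have : ¬ c < min r.length cols := by omega
      simp [hr, this]

theorem outerFold_snd (rows : List (List String)) (cols : Nat)
    (st : List Bool × List Bool) (h1 : st.1.length = cols) (h2 : st.2.length = cols)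
    (c : Nat) (hc : c < cols) :
    ((rows.foldl (fun st r => (List.range (min r.length cols)).foldl (innerStep r) st) st).2).getD c true
      = (st.2.getD c true && rows.all (fun r => !decide (c < r.length) || cR r c)) := by
  induction rows generalizing st with
  | nil => simp
  | cons r rest ih =>
    simp only [List.foldl_cons, List.all_cons]
    set st' := (List.range (min r.length cols)).foldl (innerStep r) st with hst'
    have hlen := innerFold_len r (min r.length cols) st
    rw [ih st' (by rw [hst']; omega) (by rw [hst']; omega)]
    rw [hst', innerFold_snd r _ st (by omega) c]
    by_cases hr : c < r.length
    · have : c < min r.length cols := by omega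
      simp [hr, this, Bool.and_assoc]
    · have : ¬ c < min r.length cols := by omega
      simp [hr, this]

-- A-side: the column-value list, rewritten with Nat indexing
theorem colvals_eq (rows : List (List String)) (c : Nat) :
    rows.filterMap (fun r => if (c : Int) < (r.length : Int) then PySem.List.pyGet? r (c : Int) else none)
      = rows.filterMap (fun r => if c < r.length then some (r.getD c "") else none) := by
  apply List.filterMap_congr
  intro r _
  by_cases h : c < r.length
  · simp [h, List.getD]
  · simp [h]

theorem filterMap_guard_all (rows : List (List String)) (c : Nat) (q : String → Bool) :
    (rows.filterMap (fun r => if c < r.length then some (r.getD c "") else none)).all q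
      = rows.all (fun r => !decide (c < r.length) || q (r.getD c "")) := by
  induction rows with
  | nil => rfl
  | cons r rest ih =>
    by_cases h : c < r.length
    · simp only [List.filterMap_cons, h, if_true, if_false, List.all_cons, ih, decide_true,
        Bool.not_true, Bool.false_or]
    · simp only [List.filterMap_cons, h, if_true, if_false, List.all_cons, ih, decide_false,
        Bool.not_false, Bool.true_or, Bool.true_and]

theorem filter_ne_all (l : List String) (q : String → Bool) :
    ((l.filter (fun v => !(v == ""))).all q) = l.all (fun v => (v == "") || q v) := by
  induction l with
  | nil => rfl
  | cons v rest ih =>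
    by_cases h : v = ""
    · simp [h, ih]
    · have hb : (v == "") = false := by simp [h]
      simp [List.filter_cons, hb, ih]

-- A's per-column entry, factored out of its fold body
def entryA (rows : List (List String)) (c : Int) : String :=
  let col_values : List String :=
    rows.filterMap (fun r => if c < (r.length : Int) then PySem.List.pyGet? r c else none)
  if !col_values.isEmpty
      && (col_values.filter (fun v => !(v == ""))).all (fun v => pyIsInt v) then "INTEGER"
  else if !col_values.isEmpty
      && (col_values.filter (fun v => !(v == ""))).all (fun v => pyIsFloat v && !pyIsInt v) then "REAL"
  else "TEXT"

theorem A_fold_eq (rows : List (List String)) (l : List Int) (acc : List String) :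
    l.foldl
      (fun types c =>
        let col_values : List String :=
          rows.filterMap (fun r => if c < (r.length : Int) then PySem.List.pyGet? r c else none)
        if !col_values.isEmpty
            && (col_values.filter (fun v => !(v == ""))).all (fun v => pyIsInt v) then
          types ++ ["INTEGER"]
        else if !col_values.isEmpty
            && (col_values.filter (fun v => !(v == ""))).all (fun v => pyIsFloat v && !pyIsInt v) then
          types ++ ["REAL"]
        else
          types ++ ["TEXT"]) acc
      = acc ++ l.map (entryA rows) := by
  induction l generalizing acc with
  | nil => simp
  | cons c t ih =>
    simp only [List.foldl_cons, List.map_cons, ih]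
    unfold entryA
    dsimp only
    split_ifs <;> simp

theorem main_cons (r0 : List String) (rest : List (List String)) :
    infer_types_py (r0 :: rest) = infer_types_py_alt (r0 :: rest) := by
  unfold infer_types_py infer_types_py_alt
  dsimp only
  rw [A_fold_eq, List.nil_append]
  rw [PySem.List.pyRange_one]
  simp only [Int.sub_zero, Int.toNat_natCast, List.map_map]
  apply List.map_congr_left
  intro c hc
  simp only [List.mem_range] at hc
  simp only [Function.comp_apply, zero_add]
  unfold entryA
  dsimp only
  rw [colvals_eq]
  have hne : ((r0 :: rest).filterMap
      (fun r => if c < r.length then some (r.getD c "") else none)).isEmpty = false := by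
    simp [List.filterMap_cons, hc]
  rw [hne]
  simp only [Bool.not_false, Bool.true_and]
  rw [filter_ne_all, filter_ne_all, filterMap_guard_all, filterMap_guard_all]
  rw [outerFold_fst (r0 :: rest) r0.length _ (by simp) (by simp) c hc,
      outerFold_snd (r0 :: rest) r0.length _ (by simp) (by simp) c hc]
  have hrep : (List.replicate r0.length true).getD c true = true := by
    simp [List.getD, List.getElem?_replicate, hc]
  rw [hrep]
  simp only [Bool.true_and, cI, cR]

theorem infer_types_py_spec : Claim_equal_infer_types_py := by
  intro rows _
  unfold Spec_infer_types_py
  match rows with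
  | [] =>
    unfold infer_types_py infer_types_py_alt
    dsimp only
    rw [PySem.List.pyRange_one_eq_nil (by omega)]
    rfl
  | r0 :: rest => exact main_cons r0 rest
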